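-- pv_equiv track=rewrite | github.com/MrBrantCode/unitest_baseline | mut_generate/mist_train_taco/taco_3766/solution.py | count_k_choices
-- ===== SOURCE A (Python) =====
-- import math
--
-- def count_k_choices(N):
--     if N == 2:
--         return 1
--
--     def yaku(n):
--         a = set()
--         s = int(math.sqrt(n))
--         for i in range(2, s + 1):
--             if n % i == 0:
--                 a.add(i)
--                 a.add(n // i)
--         return a
--
--     ans = len(yaku(N - 1)) + 1
--     a = yaku(N)
--     for i in a:
--         n = N
--         while n % i == 0:
--             n = n // i
--         if n % i == 1:
--             ans += 1
--
--     return ans + 1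
-- ===== SOURCE B (Python) =====
-- def count_k_choices(N):
--     if N == 2:
--         return 1
--
--     def factorize(n):
--         f = {}
--         p = 2
--         while p * p <= n:
--             while n % p == 0:
--                 f[p] = f.get(p, 0) + 1
--                 n //= p
--             p += 1
--         if n > 1:
--             f[n] = f.get(n, 0) + 1
--         return f
--
--     def divisors(f):
--         ds = [1]
--         for p, e in f.items():
--             ds = [d * p ** k for d in ds for k in range(e + 1)]
--         return ds
--
--     dcount = 1
--     for e in factorize(N - 1).values():
--         dcount *= e + 1
--     ans = max(dcount - 2, 0) + 1
--
--     for i in divisors(factorize(N)):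
--         if i == 1 or i == N:
--             continue
--         m = N
--         while m % i == 0:
--             m //= i
--         if m % i == 1:
--             ans += 1
--
--     return ans + 1
-- ===== Notes on version B (the rewrite author's own statement) =====
-- stated objective: alternative
-- what changed: Replaces yaku's sqrt-bounded divisor-pair collection with trial-division factorization into a prime-to-exponent dict: the divisor count of N-1 is the product of (exponent+1) and the divisors of N are generated by multiplying out prime powers, instead of pairing each small divisor with its cofactor.
-- outside the precondition, e.g. on count_k_choices(0): A raises ValueError, B returns 2
import Mathlib
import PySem

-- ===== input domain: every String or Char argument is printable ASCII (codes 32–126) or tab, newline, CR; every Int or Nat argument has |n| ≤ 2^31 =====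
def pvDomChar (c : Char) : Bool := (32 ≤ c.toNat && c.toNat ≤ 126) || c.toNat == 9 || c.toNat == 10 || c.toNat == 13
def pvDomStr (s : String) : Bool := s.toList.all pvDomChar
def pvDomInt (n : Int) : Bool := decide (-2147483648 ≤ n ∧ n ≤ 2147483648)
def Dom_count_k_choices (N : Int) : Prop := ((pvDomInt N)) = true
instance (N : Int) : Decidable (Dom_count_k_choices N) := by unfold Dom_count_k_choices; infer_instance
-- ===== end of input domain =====

-- B factorizes by trial division and multiplies out prime powers instead of collecting sqrt-bounded divisor pairs (alternative algorithm, same cost).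


-- ===== PORT A =====
-- int(math.sqrt(n)) — CPython's correctly rounded double sqrt, truncated; equals Nat.sqrt on the domain's 0 ≤ n ≤ 2^31 (exact there)
def pySqrtA (n : Int) : Int := Int.ofNat (Nat.sqrt n.toNat)

def yakuA (n : Int) : PySem.Set Int :=
  (PySem.List.pyRange 2 (pySqrtA n + 1) 1).foldl
    (fun a i =>
      if PySem.Int.mod n i = 0 then PySem.Set.add (PySem.Set.add a i) (PySem.Int.floordiv n i)
      else a)
    PySem.Set.empty

-- 'while n % i == 0: n = n // i' with a structural fuel bound; n.toNat + 1 steps always suffice on A's calls (2 ≤ i)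
def stripGoA : Nat → Int → Int → Int
  | 0, _, n => n
  | fuel + 1, i, n => if PySem.Int.mod n i = 0 then stripGoA fuel i (PySem.Int.floordiv n i) else n

def count_k_choices (N : Int) : Int :=
  if N = 2 then 1
  else
    let ans : Int := PySem.Set.len (yakuA (N - 1)) + 1
    ((yakuA N).foldl
      (fun ans i =>
        let n := stripGoA (N.toNat + 1) i N
        if PySem.Int.mod n i = 1 then ans + 1 else ans) ans) + 1

-- ===== PORT B =====
-- inner 'while n % p == 0' of factorize: divide p out of n, counting into f[p]; fuel n.toNat + 1 always suffices on B's calls (2 ≤ p)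
def facInnerB : Nat → Int → Int → PySem.Dict Int Int → Int × PySem.Dict Int Int
  | 0, _, n, f => (n, f)
  | fuel + 1, p, n, f =>
    if PySem.Int.mod n p = 0 then
      facInnerB fuel p (PySem.Int.floordiv n p) (f.insert p (f.getD p 0 + 1))
    else (n, f)

-- outer 'while p * p <= n' of factorize; p only grows, so n.toNat + 1 steps always suffice on B's calls
def facOuterB : Nat → Int → Int → PySem.Dict Int Int → Int × PySem.Dict Int Int
  | 0, _, n, f => (n, f)
  | fuel + 1, p, n, f =>
    if p * p ≤ n then
      let r := facInnerB (n.toNat + 1) p n f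
      facOuterB fuel (p + 1) r.1 r.2
    else (n, f)

def factorizeB (n : Int) : PySem.Dict Int Int :=
  let r := facOuterB (n.toNat + 1) 2 n PySem.Dict.empty
  if 1 < r.1 then r.2.insert r.1 (r.2.getD r.1 0 + 1) else r.2

-- ds = [d * p ** k for d in ds for k in range(e + 1)] over f.items(); k ≥ 0 always, so 'p ** k' is 'pe.1 ^ k.toNat'
def divisorsB (f : PySem.Dict Int Int) : List Int :=
  f.items.foldl
    (fun ds pe =>
      ds.flatMap (fun d => (PySem.List.pyRange 0 (pe.2 + 1) 1).map (fun k => d * pe.1 ^ k.toNat)))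
    [1]

-- 'while m % i == 0: m = m // i' with the same fuel bound as A's strip loop
def stripGoB : Nat → Int → Int → Int
  | 0, _, m => m
  | fuel + 1, i, m => if PySem.Int.mod m i = 0 then stripGoB fuel i (PySem.Int.floordiv m i) else m

def count_k_choices_alt (N : Int) : Int :=
  if N = 2 then 1
  else
    let dcount := (factorizeB (N - 1)).values.foldl (fun acc e => acc * (e + 1)) 1
    let ans := max (dcount - 2) 0 + 1
    ((divisorsB (factorizeB N)).foldl
      (fun ans i =>
        if i = 1 ∨ i = N then ans
        else
          let m := stripGoB (N.toNat + 1) i N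
          if PySem.Int.mod m i = 1 then ans + 1 else ans) ans) + 1

-- ===== PRECONDITION & SPEC =====
-- A raises ValueError (math.sqrt of a negative number) for every N ≤ 0; Pre_ excludes exactly those inputs.
def Pre_count_k_choices (N : Int) : Prop := 1 ≤ N
instance (N : Int) : Decidable (Pre_count_k_choices N) := by unfold Pre_count_k_choices; infer_instance
def pvWitness_count_k_choices : Int := (12)

def Spec_count_k_choices (N : Int) (out : Int) : Prop := out = count_k_choices_alt N
instance (N : Int) (out : Int) : Decidable (Spec_count_k_choices N out) := by unfold Spec_count_k_choices; infer_instance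

-- ===== CLAIM (what is proved, stated in full; the proofs are below) =====
def Claim_equal_count_k_choices : Prop := ∀ (N : Int), Dom_count_k_choices N → Pre_count_k_choices N → Spec_count_k_choices N (count_k_choices N)

-- ===== LEMMAS AND PROOFS =====

lemma stripGo_eq (fuel : Nat) (i : Int) : ∀ n, stripGoA fuel i n = stripGoB fuel i n := by
  induction fuel with
  | zero => intro n; rfl
  | succ fuel ih => intro n; simp only [stripGoA, stripGoB, ih]

lemma mem_yaku_foldl (n : Int) (l : List Int) (s : PySem.Set Int) (x : Int) :
    x ∈ l.foldl (fun a i => if PySem.Int.mod n i = 0 then PySem.Set.add (PySem.Set.add a i) (PySem.Int.floordiv n i) else a) s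
    ↔ x ∈ s ∨ ∃ i ∈ l, PySem.Int.mod n i = 0 ∧ (x = i ∨ x = PySem.Int.floordiv n i) := by
  induction l generalizing s with
  | nil => simp
  | cons hd tl ih =>
    simp only [List.foldl_cons, ih, List.mem_cons]
    by_cases h : PySem.Int.mod n hd = 0
    · simp only [h, if_pos, PySem.Set.mem_add]
      constructor
      · rintro (((hx|hx)|hx)|⟨i,hi,hm,hx⟩)
        · exact Or.inl hx
        · exact Or.inr ⟨hd, Or.inl rfl, h, Or.inl hx⟩
        · exact Or.inr ⟨hd, Or.inl rfl, h, Or.inr hx⟩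
        · exact Or.inr ⟨i, Or.inr hi, hm, hx⟩
      · rintro (hx|⟨i,(rfl|hi),hm,hx⟩)
        · exact Or.inl (Or.inl (Or.inl hx))
        · rcases hx with hx|hx
          · exact Or.inl (Or.inl (Or.inr hx))
          · exact Or.inl (Or.inr hx)
        · exact Or.inr ⟨i, hi, hm, hx⟩
    · simp only [h, if_false]
      constructor
      · rintro (hx|⟨i,hi,hm,hx⟩)
        · exact Or.inl hx
        · exact Or.inr ⟨i, Or.inr hi, hm, hx⟩
      · rintro (hx|⟨i,(rfl|hi),hm,hx⟩)
        · exact Or.inl hx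
        · exact absurd hm h
        · exact Or.inr ⟨i, hi, hm, hx⟩

lemma nodup_yaku_foldl (n : Int) (l : List Int) (s : PySem.Set Int) (hs : s.Nodup) :
    (l.foldl (fun a i => if PySem.Int.mod n i = 0 then PySem.Set.add (PySem.Set.add a i) (PySem.Int.floordiv n i) else a) s).Nodup := by
  induction l generalizing s with
  | nil => exact hs
  | cons hd tl ih =>
    simp only [List.foldl_cons]
    by_cases h : PySem.Int.mod n hd = 0
    · simp only [h]
      exact ih _ (PySem.Set.nodup_add _ _ (PySem.Set.nodup_add _ _ hs))
    · simp only [h]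
      exact ih _ (by simp [hs])

-- divisors of m other than 1 and m
def DF (m : Nat) : Finset Nat := (Nat.divisors m).filter (fun d => d ≠ 1 ∧ d ≠ m)

lemma mem_DF (m d : Nat) (hm : 1 ≤ m) : d ∈ DF m ↔ 2 ≤ d ∧ d < m ∧ d ∣ m := by
  simp only [DF, Finset.mem_filter, Nat.mem_divisors]
  constructor
  · rintro ⟨⟨hdvd, -⟩, h1, h2⟩
    have hle := Nat.le_of_dvd (by omega) hdvd
    have : 1 ≤ d := Nat.pos_of_dvd_of_pos hdvd (by omega)
    exact ⟨by omega, by omega, hdvd⟩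
  · rintro ⟨h2, hlt, hdvd⟩
    exact ⟨⟨hdvd, by omega⟩, by omega, by omega⟩

lemma mem_yakuA (m : Nat) (x : Int) :
    x ∈ yakuA (m : Int) ↔ ∃ d : Nat, (2 ≤ d ∧ d < m ∧ d ∣ m) ∧ x = (d : Int) := by
  have hsq : pySqrtA (m : Int) = ((Nat.sqrt m : Nat) : Int) := by
    simp [pySqrtA]
  rw [yakuA, hsq, mem_yaku_foldl]
  constructor
  · rintro (hx | ⟨i, hi, hmod, hx⟩)
    · simp [PySem.Set.empty] at hx
    · rw [PySem.List.mem_pyRange_one] at hi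
      obtain ⟨h2i, hiu⟩ := hi
      set j := i.toNat with hj
      have hij : i = (j : Int) := by omega
      have hjs : j ≤ Nat.sqrt m := by omega
      have h2j : 2 ≤ j := by omega
      have hjj : j * j ≤ m := Nat.le_sqrt.mp hjs
      have hm0 : 0 < m := by nlinarith
      rw [hij, PySem.Int.mod_natCast] at hmod
      have hdvd : j ∣ m := by
        have : m % j = 0 := by exact_mod_cast hmod
        exact Nat.dvd_of_mod_eq_zero this
      have hjm : j < m := by
        rcases Nat.lt_or_ge j m with h | h
        · exact h
        · exfalso
          have : j ≤ m := Nat.le_of_dvd hm0 hdvd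
          have hjem : j = m := by omega
          have := Nat.sqrt_lt_self (n := m) (by nlinarith)
          omega
      rcases hx with rfl | rfl
      · exact ⟨j, ⟨h2j, hjm, hdvd⟩, hij⟩
      · refine ⟨m / j, ⟨?_, ?_, Nat.div_dvd_of_dvd hdvd⟩, by rw [hij, PySem.Int.floordiv_natCast]⟩
        · exact (Nat.le_div_iff_mul_le (by omega)).mpr (by nlinarith)
        · exact Nat.div_lt_self hm0 (by omega)
  · rintro ⟨d, ⟨h2d, hdm, hdvd⟩, rfl⟩
    right
    obtain ⟨q, hq⟩ := hdvd
    have hm0 : 0 < m := by omega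
    have hq2 : 2 ≤ q := by
      rcases Nat.lt_or_ge q 2 with h | h
      · interval_cases q <;> omega
      · exact h
    rcases Nat.lt_or_ge (Nat.sqrt m) d with hds | hds
    · -- d > sqrt m: use the cofactor q
      have hqd : q < d := by
        by_contra hle
        push Not at hle
        have : d ≤ Nat.sqrt m := Nat.le_sqrt.mpr (by nlinarith)
        omega
      have hqs : q ≤ Nat.sqrt m := Nat.le_sqrt.mpr (by nlinarith)
      refine ⟨(q : Int), ?_, ?_, Or.inr ?_⟩
      · rw [PySem.List.mem_pyRange_one]; omega
      · rw [PySem.Int.mod_natCast]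
        have : m % q = 0 := Nat.dvd_iff_mod_eq_zero.mp ⟨d, by rw [hq, Nat.mul_comm]⟩
        exact_mod_cast this
      · rw [PySem.Int.floordiv_natCast]
        have : m / q = d := by
          rw [hq]; exact Nat.mul_div_left d (by omega)
        rw [this]
    · refine ⟨(d : Int), ?_, ?_, Or.inl rfl⟩
      · rw [PySem.List.mem_pyRange_one]; omega
      · rw [PySem.Int.mod_natCast]
        have : m % d = 0 := Nat.dvd_iff_mod_eq_zero.mp ⟨q, hq⟩
        exact_mod_cast this

lemma nodup_yakuA (n : Int) : (yakuA n).Nodup := by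
  rw [yakuA]
  exact nodup_yaku_foldl _ _ _ (by simp [PySem.Set.empty])

lemma toFinset_yakuA (m : Nat) (hm : 1 ≤ m) :
    (yakuA (m : Int)).toFinset = (DF m).image (fun d : Nat => (d : Int)) := by
  ext x
  simp only [List.mem_toFinset, mem_yakuA, Finset.mem_image]
  constructor
  · rintro ⟨d, hd, rfl⟩
    exact ⟨d, (mem_DF m d hm).mpr hd, rfl⟩
  · rintro ⟨d, hd, rfl⟩
    exact ⟨d, (mem_DF m d hm).mp hd, rfl⟩

lemma len_yakuA (m : Nat) (hm : 1 ≤ m) :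
    PySem.Set.len (yakuA (m : Int)) = ((DF m).card : Int) := by
  have h1 : (yakuA (m : Int)).toFinset.card = (yakuA (m : Int)).length :=
    List.toFinset_card_of_nodup (nodup_yakuA _)
  have h2 : (yakuA (m : Int)).toFinset.card = (DF m).card := by
    rw [toFinset_yakuA m hm]
    exact Finset.card_image_of_injective _ (fun a b h => by exact_mod_cast h)
  simp only [PySem.Set.len]
  omega

lemma facInnerB_spec (p : Int) (hp : 1 < p) :
    ∀ (fuel : Nat) (n : Int) (f : PySem.Dict Int Int), 0 < n → n.toNat < fuel →
    ∃ (c : Nat) (r : Int),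
      facInnerB fuel p n f = (r, if c = 0 then f else f.insert p (f.getD p 0 + (c : Int))) ∧
      n = r * p ^ c ∧ 0 < r ∧ ¬ (p ∣ r) := by
  intro fuel
  induction fuel with
  | zero => intro n f hn hf; omega
  | succ fuel ih =>
    intro n f hn hf
    by_cases hmod : PySem.Int.mod n p = 0
    · have hdvd : p ∣ n := (PySem.Int.mod_eq_zero_iff_dvd n p).mp hmod
      have hfd : PySem.Int.floordiv n p = n / p := PySem.Int.floordiv_eq_ediv_of_pos (by omega)
      obtain ⟨q, hq⟩ := hdvd
      have hq' : n / p = q := by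
        rw [hq]; exact Int.mul_ediv_cancel_left q (by omega)
      have hqpos : 0 < q := by nlinarith
      have hqlt : q < n := by nlinarith
      obtain ⟨c, r, heq, hnr, hr, hpr⟩ :=
        ih q (f.insert p (f.getD p 0 + 1)) hqpos (by omega)
      refine ⟨c + 1, r, ?_, ?_, hr, hpr⟩
      · simp only [facInnerB, hmod, if_pos, hfd, hq', heq]
        congr 1
        by_cases hc : c = 0
        · subst hc; simp
        · simp only [hc, Nat.add_eq_zero_iff, if_false,
            PySem.Dict.getD_insert_self, PySem.Dict.insert_insert_self]
          congr 1
          push_cast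
          ring
      · rw [hq, hnr]; ring
    · exact ⟨0, n, by simp [facInnerB, hmod], by ring, hn,
        fun hdvd => hmod ((PySem.Int.mod_eq_zero_iff_dvd n p).mpr hdvd)⟩

def entProd (l : List (Int × Int)) : Int := (l.map (fun pe => pe.1 ^ pe.2.toNat)).prod

lemma entProd_append (l : List (Int × Int)) (x : Int × Int) :
    entProd (l ++ [x]) = entProd l * x.1 ^ x.2.toNat := by
  simp [entProd]

def GoodUpto (P : Int) (l : List (Int × Int)) : Prop :=
  (∀ pe ∈ l, 2 ≤ pe.1 ∧ 1 ≤ pe.2 ∧ Nat.Prime pe.1.toNat ∧ pe.1 < P) ∧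
  l.Pairwise (fun a b => a.1 < b.1)

lemma GoodUpto.mono {P P' : Int} {l : List (Int × Int)} (h : GoodUpto P l) (hle : P ≤ P') :
    GoodUpto P' l :=
  ⟨fun pe hpe => ⟨(h.1 pe hpe).1, (h.1 pe hpe).2.1, (h.1 pe hpe).2.2.1,
    lt_of_lt_of_le (h.1 pe hpe).2.2.2 hle⟩, h.2⟩

lemma not_contains_of_goodUpto {P : Int} {f : PySem.Dict Int Int} (h : GoodUpto P f.items)
    {k : Int} (hk : P ≤ k) : f.contains k = false := by
  rw [PySem.Dict.contains_eq_decide_mem_keys, decide_eq_false_iff_not]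
  intro hmem
  simp only [PySem.Dict.keys, List.mem_map] at hmem
  obtain ⟨pe, hpe, hfst⟩ := hmem
  have := (h.1 pe hpe).2.2.2
  omega

-- a prime ≥ p divides n, and n has no divisor in (1, p) → the prime factor structure continues
lemma prime_of_no_small_divisors (p : Int) (hp : 1 < p)
    (hnsd : ∀ d : Int, 1 < d → d < p → ¬ d ∣ p) : Nat.Prime p.toNat := by
  by_contra hnp
  have h2 : 2 ≤ p.toNat := by omega
  have hq := Nat.minFac_prime (n := p.toNat) (by omega)
  have hqd : p.toNat.minFac ∣ p.toNat := Nat.minFac_dvd _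
  have hqne : p.toNat.minFac ≠ p.toNat := by
    intro he
    exact hnp (Nat.prime_def_minFac.mpr ⟨h2, he⟩)
  have hqlt : p.toNat.minFac < p.toNat := lt_of_le_of_ne (Nat.le_of_dvd (by omega) hqd) hqne
  have hq2 : 2 ≤ p.toNat.minFac := hq.two_le
  refine hnsd ((p.toNat.minFac : Nat) : Int) (by omega) (by omega) ?_
  have : ((p.toNat.minFac : Nat) : Int) ∣ ((p.toNat : Nat) : Int) := Int.natCast_dvd_natCast.mpr hqd
  rwa [Int.toNat_of_nonneg (by omega)] at this

lemma facOuterB_spec :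
    ∀ (fuel : Nat) (p n : Int) (f : PySem.Dict Int Int),
    1 < p → 0 < n → n.toNat + 2 ≤ p.toNat + fuel →
    (∀ d : Int, 1 < d → d < p → ¬ d ∣ n) → GoodUpto p f.items →
    ∃ (P' n' : Int) (f' : PySem.Dict Int Int),
      facOuterB fuel p n f = (n', f') ∧ p ≤ P' ∧ 0 < n' ∧ n' ≤ n ∧
      entProd f'.items * n' = entProd f.items * n ∧
      GoodUpto P' f'.items ∧ (∀ d : Int, 1 < d → d < P' → ¬ d ∣ n') ∧ n' < P' * P' := by
  intro fuel
  induction fuel with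
  | zero =>
    intro p n f hp hn hfuel hnsd hgood
    refine ⟨p, n, f, rfl, le_refl _, hn, le_refl _, rfl, hgood, hnsd, ?_⟩
    have : n < p := by omega
    nlinarith
  | succ fuel ih =>
    intro p n f hp hn hfuel hnsd hgood
    by_cases hguard : p * p ≤ n
    · obtain ⟨c, r, hinner, hnr, hrpos, hpr⟩ :=
        facInnerB_spec p hp (n.toNat + 1) n f hn (by omega)
      have hrle : r ≤ n := by
        have hpc : (1 : Int) ≤ p ^ c := one_le_pow₀ (by omega)
        nlinarith
      have hrdvdn : r ∣ n := ⟨p ^ c, hnr⟩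
      by_cases hc : c = 0
      · subst hc
        have hrn : r = n := by rw [hnr]; ring
        obtain ⟨P', n', f', hrec, hple, h1, h2, h3, h4, h5, h6⟩ :=
          ih (p + 1) r f (by omega) hrpos (by omega)
            (fun d hd1 hdp hdvd => by
              rcases lt_or_eq_of_le (by omega : d ≤ p) with h | h
              · exact hnsd d hd1 h (hrn ▸ hdvd)
              · subst h; exact hpr hdvd)
            (hgood.mono (by omega))
        refine ⟨P', n', f', ?_, by omega, h1, by omega, ?_, h4, h5, h6⟩
        · simp only [facOuterB, hguard, if_pos, hinner]
          simpa using hrec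
        · rw [h3, hrn]
      · -- c ≥ 1: p is a prime factor, dict gains (p, c)
        have hpdvd : p ∣ n := by
          rw [hnr]
          exact Dvd.dvd.mul_left (dvd_pow_self p hc) r
        have hprime : Nat.Prime p.toNat :=
          prime_of_no_small_divisors p hp
            (fun d hd1 hdp hddp => hnsd d hd1 hdp (hddp.trans hpdvd))
        have hnotc : f.contains p = false := not_contains_of_goodUpto hgood (le_refl p)
        have hgd : f.getD p 0 = 0 := PySem.Dict.getD_of_not_contains f 0 hnotc
        have hitems : (f.insert p (f.getD p 0 + (c : Int))).items = f.items ++ [(p, (c : Int))] := by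
          rw [PySem.Dict.items_insert_of_not_contains f _ hnotc, hgd]
          norm_num
        have hgood' : GoodUpto (p + 1) (f.items ++ [(p, (c : Int))]) := by
          constructor
          · intro pe hpe
            rcases List.mem_append.mp hpe with h | h
            · have := hgood.1 pe h
              exact ⟨this.1, this.2.1, this.2.2.1, by omega⟩
            · simp only [List.mem_singleton] at h
              subst h
              refine ⟨by omega, ?_, by simpa using hprime, by omega⟩
              show (1 : Int) ≤ (c : Int)
              exact_mod_cast Nat.one_le_iff_ne_zero.mpr hc
          · rw [List.pairwise_append]
            refine ⟨hgood.2, List.pairwise_singleton _ _, ?_⟩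
            intro a ha b hb
            simp only [List.mem_singleton] at hb
            subst hb
            exact (hgood.1 a ha).2.2.2
        obtain ⟨P', n', f', hrec, hple, h1, h2, h3, h4, h5, h6⟩ :=
          ih (p + 1) r (f.insert p (f.getD p 0 + (c : Int))) (by omega) hrpos (by omega)
            (fun d hd1 hdp hdvd => by
              rcases lt_or_eq_of_le (by omega : d ≤ p) with h | h
              · exact hnsd d hd1 h (hdvd.trans hrdvdn)
              · subst h; exact hpr hdvd)
            (hitems ▸ hgood')
        refine ⟨P', n', f', ?_, by omega, h1, by omega, ?_, h4, h5, h6⟩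
        · simp only [facOuterB, hguard, if_pos, hinner]
          have hcne : ¬ c = 0 := hc
          simp only [hcne, if_false] at hrec ⊢
          exact hrec
        · rw [h3, hitems, entProd_append]
          simp only [Int.toNat_natCast]
          rw [hnr]
          ring
    · refine ⟨p, n, f, ?_, le_refl _, hn, le_refl _, rfl, hgood, hnsd, by omega⟩
      simp [facOuterB, hguard]

lemma entProd_cast (L : List (Nat × Nat)) :
    entProd (L.map (fun pe => ((pe.1 : Int), (pe.2 : Int)))) =
      (((L.map (fun pe => pe.1 ^ pe.2)).prod : Nat) : Int) := by
  induction L with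
  | nil => simp [entProd]
  | cons hd tl ih =>
    simp only [List.map_cons, List.prod_cons, entProd, List.map_map] at ih ⊢
    rw [Int.toNat_natCast, ih]
    push_cast
    ring

lemma natSpec_of_items (F : List (Int × Int)) (m : Nat)
    (hgoodF : ∀ pe ∈ F, 2 ≤ pe.1 ∧ 1 ≤ pe.2 ∧ Nat.Prime pe.1.toNat)
    (hpairF : F.Pairwise (fun a b => a.1 < b.1))
    (hentF : entProd F = (m : Int)) :
    ∃ L : List (Nat × Nat),
      F = L.map (fun pe => ((pe.1 : Int), (pe.2 : Int))) ∧
      (∀ pe ∈ L, Nat.Prime pe.1 ∧ 1 ≤ pe.2) ∧ L.Pairwise (fun a b => a.1 < b.1) ∧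
      (L.map (fun pe => pe.1 ^ pe.2)).prod = m := by
  have hFeq : F = (F.map (fun pe => (pe.1.toNat, pe.2.toNat))).map
      (fun pe => ((pe.1 : Int), (pe.2 : Int))) := by
    rw [List.map_map]
    symm
    conv_rhs => rw [← List.map_id F]
    refine List.map_congr_left ?_
    intro pe hpe
    have := hgoodF pe hpe
    simp [Int.toNat_of_nonneg (by omega : (0:Int) ≤ pe.1),
      Int.toNat_of_nonneg (by omega : (0:Int) ≤ pe.2)]
  refine ⟨_, hFeq, ?_, ?_, ?_⟩
  · intro pe hpe
    simp only [List.mem_map] at hpe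
    obtain ⟨a, ha, rfl⟩ := hpe
    have := hgoodF a ha
    exact ⟨this.2.2, by omega⟩
  · rw [List.pairwise_map]
    refine hpairF.imp_of_mem ?_
    intro a b ha hb hab
    have h1 := (hgoodF a ha).1
    have h2 := (hgoodF b hb).1
    simp only
    omega
  · have hc := entProd_cast (F.map (fun pe => (pe.1.toNat, pe.2.toNat)))
    rw [← hFeq, hentF] at hc
    exact_mod_cast hc.symm

lemma factorizeB_natSpec (m : Nat) (hm : 1 ≤ m) :
    ∃ L : List (Nat × Nat),
      (factorizeB (m : Int)).items = L.map (fun pe => ((pe.1 : Int), (pe.2 : Int))) ∧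
      (∀ pe ∈ L, Nat.Prime pe.1 ∧ 1 ≤ pe.2) ∧ L.Pairwise (fun a b => a.1 < b.1) ∧
      (L.map (fun pe => pe.1 ^ pe.2)).prod = m := by
  have hm0 : (0 : Int) < (m : Int) := by exact_mod_cast hm
  obtain ⟨P', n', f', hrec, hple, hn'pos, hn'le, hent, hgood, hnsd, hsq⟩ :=
    facOuterB_spec ((m : Int).toNat + 1) 2 (m : Int) PySem.Dict.empty (by omega) hm0
      (by omega) (fun d hd1 hd2 _ => by omega) (by constructor <;> simp [PySem.Dict.empty])
  have hent' : entProd f'.items * n' = (m : Int) := by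
    simpa [PySem.Dict.empty, entProd] using hent
  have hfact : factorizeB (m : Int) =
      (if 1 < n' then f'.insert n' (f'.getD n' 0 + 1) else f') := by
    rw [factorizeB, hrec]
  by_cases hn1 : 1 < n'
  · have hP'n : P' ≤ n' := by
      by_contra hlt
      push Not at hlt
      exact hnsd n' hn1 hlt (dvd_refl n')
    have hprime : Nat.Prime n'.toNat := by
      by_contra hnp
      have hq := Nat.minFac_prime (n := n'.toNat) (by omega)
      have hqd := Nat.minFac_dvd n'.toNat
      have hsqle := Nat.minFac_sq_le_self (n := n'.toNat) (by omega) hnp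
      have hq2 := hq.two_le
      have hqP : ((n'.toNat.minFac : Nat) : Int) < P' := by
        have h1 : (n'.toNat.minFac) ^ 2 ≤ n'.toNat := hsqle
        have h2 : (n' : Int) < P' * P' := hsq
        nlinarith [hq2, hple, (by omega : (0:Int) ≤ n'), Int.toNat_of_nonneg (by omega : (0:Int) ≤ n')]
      refine hnsd ((n'.toNat.minFac : Nat) : Int) (by exact_mod_cast hq2) hqP ?_
      have : ((n'.toNat.minFac : Nat) : Int) ∣ ((n'.toNat : Nat) : Int) := Int.natCast_dvd_natCast.mpr hqd
      rwa [Int.toNat_of_nonneg (by omega)] at this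
    have hnotc : f'.contains n' = false := not_contains_of_goodUpto hgood hP'n
    have hitems : (factorizeB (m : Int)).items = f'.items ++ [(n', 1)] := by
      rw [hfact, if_pos hn1, PySem.Dict.items_insert_of_not_contains f' _ hnotc,
        PySem.Dict.getD_of_not_contains f' 0 hnotc]
      norm_num
    rw [hitems]
    refine natSpec_of_items _ m ?_ ?_ ?_
    · intro pe hpe
      rcases List.mem_append.mp hpe with h | h
      · have := hgood.1 pe h
        exact ⟨this.1, this.2.1, this.2.2.1⟩
      · simp only [List.mem_singleton] at h
        subst h
        exact ⟨by omega, by norm_num, hprime⟩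
    · rw [List.pairwise_append]
      refine ⟨hgood.2, List.pairwise_singleton _ _, ?_⟩
      intro a ha b hb
      simp only [List.mem_singleton] at hb
      subst hb
      exact lt_of_lt_of_le (hgood.1 a ha).2.2.2 hP'n
    · rw [entProd_append]
      simpa using hent'
  · have hn'1 : n' = 1 := by omega
    have hitems : (factorizeB (m : Int)).items = f'.items := by
      rw [hfact, if_neg hn1]
    rw [hitems]
    refine natSpec_of_items _ m ?_ hgood.2 ?_
    · intro pe hpe
      have := hgood.1 pe hpe
      exact ⟨this.1, this.2.1, this.2.2.1⟩
    · rw [← hent', hn'1]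
      ring

def natStep (ds : List Nat) (pe : Nat × Nat) : List Nat :=
  ds.flatMap (fun d => (List.range (pe.2 + 1)).map (fun k => d * pe.1 ^ k))

lemma mul_pow_inj (p : Nat) (hp : 2 ≤ p) {d₁ d₂ k₁ k₂ : Nat}
    (h₁ : ¬ p ∣ d₁) (h₂ : ¬ p ∣ d₂) (h : d₁ * p ^ k₁ = d₂ * p ^ k₂) : d₁ = d₂ ∧ k₁ = k₂ := by
  have key : ∀ {a b i j : Nat}, ¬ p ∣ a → ¬ p ∣ b → a * p ^ i = b * p ^ j → i ≤ j → a = b ∧ i = j := by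
    intro a b i j ha hb hab hle
    have hj : j = (j - i) + i := by omega
    rw [hj, pow_add, ← Nat.mul_assoc] at hab
    have hcancel : a = b * p ^ (j - i) :=
      Nat.eq_of_mul_eq_mul_right (Nat.pow_pos (by omega : 0 < p)) hab
    rcases Nat.eq_zero_or_pos (j - i) with hz | hpos
    · rw [hz, pow_zero, Nat.mul_one] at hcancel
      omega
    · exfalso
      exact ha (hcancel ▸ Dvd.dvd.mul_left (dvd_pow_self p (by omega)) b)
  rcases Nat.le_total k₁ k₂ with hle | hle
  · exact key h₁ h₂ h hle
  · obtain ⟨hba, hji⟩ := key h₂ h₁ h.symm hle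
    exact ⟨hba.symm, hji.symm⟩

lemma mem_natStep (M : Nat) (p e : Nat) (ds : List Nat)
    (hds : ∀ x, x ∈ ds ↔ x ∣ M) (hp : Nat.Prime p) (x : Nat) :
    x ∈ natStep ds (p, e) ↔ x ∣ M * p ^ e := by
  simp only [natStep, List.mem_flatMap, List.mem_map, List.mem_range]
  constructor
  · rintro ⟨d, hd, k, hk, rfl⟩
    exact Nat.mul_dvd_mul ((hds d).mp hd) (pow_dvd_pow p (by omega))
  · intro hx
    obtain ⟨d, q, hdM, hqpe, hdq⟩ := Nat.dvd_mul.mp hx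
    obtain ⟨k, hk, rfl⟩ := (Nat.dvd_prime_pow hp).mp hqpe
    exact ⟨d, (hds d).mpr hdM, k, by omega, hdq⟩

lemma nodup_natStep (M : Nat) (_hM : 0 < M)  (p e : Nat) (hp : Nat.Prime p) (hpM : ¬ p ∣ M)
    (ds : List Nat) (hnd : ds.Nodup) (hds : ∀ x, x ∈ ds ↔ x ∣ M) :
    (natStep ds (p, e)).Nodup := by
  have hdvd : ∀ d ∈ ds, ¬ p ∣ d := fun d hd hpd => hpM (hpd.trans ((hds d).mp hd))
  have hp2 := hp.two_le
  rw [natStep, List.nodup_flatMap]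
  constructor
  · intro d hd
    refine List.Nodup.map ?_ List.nodup_range
    intro k₁ k₂ hk
    exact (mul_pow_inj p hp2 (hdvd d hd) (hdvd d hd) hk).2
  · refine hnd.imp_of_mem ?_
    intro d₁ d₂ h1 h2 hne
    simp only [Function.onFun, List.disjoint_left, List.mem_map, List.mem_range]
    rintro x ⟨k₁, hk₁, rfl⟩ ⟨k₂, hk₂, habs⟩
    exact hne (mul_pow_inj p hp2 (hdvd d₁ h1) (hdvd d₂ h2) habs.symm).1

lemma length_natStep (p e : Nat) (ds : List Nat) :
    (natStep ds (p, e)).length = ds.length * (e + 1) := by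
  rw [natStep, List.length_flatMap]
  simp [List.map_const']

lemma natDivs_spec :
    ∀ (L : List (Nat × Nat)) (M : Nat) (ds : List Nat),
    0 < M → (∀ pe ∈ L, Nat.Prime pe.1 ∧ ¬ pe.1 ∣ M) → L.Pairwise (fun a b => a.1 ≠ b.1) →
    ds.Nodup → (∀ x, x ∈ ds ↔ x ∣ M) →
    (L.foldl natStep ds).Nodup ∧
    (∀ x, x ∈ L.foldl natStep ds ↔ x ∣ M * (L.map (fun pe => pe.1 ^ pe.2)).prod) ∧
    (L.foldl natStep ds).length = ds.length * (L.map (fun pe => pe.2 + 1)).prod := by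
  intro L
  induction L with
  | nil =>
    intro M ds hM hL hpair hnd hds
    refine ⟨hnd, fun x => ?_, by simp⟩
    simpa using hds x
  | cons pe tl ih =>
    intro M ds hM hL hpair hnd hds
    obtain ⟨p, e⟩ := pe
    have hp := (hL (p, e) (List.mem_cons_self)).1
    have hpM := (hL (p, e) (List.mem_cons_self)).2
    have hM' : 0 < M * p ^ e := Nat.mul_pos hM (Nat.pow_pos hp.pos)
    have hmem' := mem_natStep M p e ds hds hp
    have hnd' := nodup_natStep M hM p e hp hpM ds hnd hds
    have htl : ∀ qe ∈ tl, Nat.Prime qe.1 ∧ ¬ qe.1 ∣ M * p ^ e := by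
      intro qe hqe
      refine ⟨(hL qe (List.mem_cons_of_mem _ hqe)).1, ?_⟩
      intro hdvd
      rcases (Nat.Prime.dvd_mul (hL qe (List.mem_cons_of_mem _ hqe)).1).mp hdvd with h | h
      · exact (hL qe (List.mem_cons_of_mem _ hqe)).2 h
      · have := (hL qe (List.mem_cons_of_mem _ hqe)).1.dvd_of_dvd_pow h
        have heq := (Nat.prime_dvd_prime_iff_eq (hL qe (List.mem_cons_of_mem _ hqe)).1 hp).mp this
        have hne := (List.pairwise_cons.mp hpair).1 qe hqe
        exact hne.symm heq
    obtain ⟨c1, c2, c3⟩ := ih (M * p ^ e) (natStep ds (p, e)) hM' htl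
      (List.pairwise_cons.mp hpair).2 hnd' hmem'
    refine ⟨c1, fun x => ?_, ?_⟩
    · rw [List.foldl_cons, c2 x]
      simp only [List.map_cons, List.prod_cons]
      rw [Nat.mul_assoc]
    · rw [List.foldl_cons, c3, length_natStep]
      simp only [List.map_cons, List.prod_cons]
      ring

lemma fold_cast (L : List (Nat × Nat)) : ∀ ds : List Nat,
    (L.map (fun pe => ((pe.1 : Int), (pe.2 : Int)))).foldl
      (fun ds pe => ds.flatMap (fun d => (PySem.List.pyRange 0 (pe.2 + 1) 1).map (fun k => d * pe.1 ^ k.toNat)))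
      (ds.map (fun d : Nat => (d : Int)))
    = (L.foldl natStep ds).map (fun d : Nat => (d : Int)) := by
  induction L with
  | nil => intro ds; simp
  | cons pe tl ih =>
    intro ds
    obtain ⟨p, e⟩ := pe
    simp only [List.map_cons, List.foldl_cons]
    rw [show ((e : Int) + 1) = ((e + 1 : Nat) : Int) by push_cast; ring,
      PySem.List.pyRange_zero_nat]
    rw [show (List.map (fun d : Nat => (d : Int)) ds).flatMap
        (fun d => (List.map (fun k : Nat => (k : Int)) (List.range (e + 1))).map
          (fun k => d * (p : Int) ^ k.toNat))
      = (natStep ds (p, e)).map (fun d : Nat => (d : Int)) from ?_]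
    · exact ih (natStep ds (p, e))
    · rw [natStep, List.map_flatMap, List.flatMap_map]
      congr 1
      funext d
      simp only [List.map_map]
      congr 1

lemma foldl_mul_succ_cast : ∀ (l : List Nat) (a : Int),
    (l.map (fun e : Nat => (e : Int))).foldl (fun acc e => acc * (e + 1)) a
      = a * (((l.map (fun e => e + 1)).prod : Nat) : Int) := by
  intro l
  induction l with
  | nil => intro a; simp
  | cons hd tl ih =>
    intro a
    simp only [List.map_cons, List.foldl_cons, List.prod_cons, ih]
    push_cast
    ring

lemma divisorsB_spec (m : Nat) (hm : 1 ≤ m) :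
    ∃ D : List Nat,
      divisorsB (factorizeB (m : Int)) = D.map (fun d : Nat => (d : Int)) ∧
      D.Nodup ∧ (∀ x, x ∈ D ↔ x ∣ m) ∧
      (factorizeB (m : Int)).values.foldl (fun acc e => acc * (e + 1)) 1
        = ((D.length : Nat) : Int) := by
  obtain ⟨L, hitems, hprim, hpair, hprod⟩ := factorizeB_natSpec m hm
  have hpair' : L.Pairwise (fun a b => a.1 ≠ b.1) := hpair.imp (fun h => by omega)
  have hL : ∀ pe ∈ L, Nat.Prime pe.1 ∧ ¬ pe.1 ∣ 1 := by
    intro pe hpe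
    refine ⟨(hprim pe hpe).1, ?_⟩
    rw [Nat.dvd_one]
    exact (hprim pe hpe).1.ne_one
  obtain ⟨hnd, hmem, hlen⟩ := natDivs_spec L 1 [1] (by omega) hL hpair'
    (List.nodup_singleton 1) (fun x => by simp [Nat.dvd_one])
  refine ⟨L.foldl natStep [1], ?_, hnd, fun x => ?_, ?_⟩
  · rw [divisorsB, hitems]
    have : ([1] : List Int) = ([1] : List Nat).map (fun d : Nat => (d : Int)) := by simp
    rw [this, fold_cast]
  · rw [hmem x, hprod, Nat.one_mul]
  · have hv : (factorizeB (m : Int)).values = (L.map (fun pe => pe.2)).map (fun e : Nat => (e : Int)) := by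
      simp only [PySem.Dict.values, hitems, List.map_map]
      rfl
    rw [hv, foldl_mul_succ_cast, hlen]
    simp [List.map_map]
    rfl

lemma length_eq_card_divisors (m : Nat) (hm : 1 ≤ m) (D : List Nat) (hnd : D.Nodup)
    (hmem : ∀ x, x ∈ D ↔ x ∣ m) : D.length = m.divisors.card := by
  rw [← List.toFinset_card_of_nodup hnd]
  congr 1
  ext x
  simp only [List.mem_toFinset, hmem, Nat.mem_divisors]
  exact ⟨fun h => ⟨h, by omega⟩, fun h => h.1⟩

lemma card_DF (m : Nat) (hm : 2 ≤ m) : m.divisors.card = (DF m).card + 2 := by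
  have := Finset.card_filter_add_card_filter_not
    (s := m.divisors) (p := fun d => d ≠ 1 ∧ d ≠ m)
  rw [DF]
  have h2 : (m.divisors.filter (fun d => ¬(d ≠ 1 ∧ d ≠ m))).card = 2 := by
    have : m.divisors.filter (fun d => ¬(d ≠ 1 ∧ d ≠ m)) = {1, m} := by
      ext d
      simp only [Finset.mem_filter, Nat.mem_divisors, Finset.mem_insert, Finset.mem_singleton]
      constructor
      · rintro ⟨-, h⟩
        by_cases hd1 : d = 1
        · exact Or.inl hd1
        · by_cases hdm : d = m
          · exact Or.inr hdm
          · exact absurd ⟨hd1, hdm⟩ h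
      · rintro (h | h)
        · exact ⟨⟨h ▸ Nat.one_dvd m, by omega⟩, by simp [h]⟩
        · exact ⟨⟨h ▸ dvd_refl m, by omega⟩, by simp [h]⟩
    rw [this]
    exact Finset.card_pair (by omega)
  omega

lemma countP_eq (m : Nat) (hm : 3 ≤ m) (D : List Nat) (hnd : D.Nodup)
    (hmem : ∀ x, x ∈ D ↔ x ∣ m) :
    (D.map (fun d : Nat => (d : Int))).countP
      (fun i => decide (¬(i = 1 ∨ i = (m : Int)) ∧
        PySem.Int.mod (stripGoB (m + 1) i (m : Int)) i = 1))
    = (yakuA (m : Int)).countP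
      (fun i => decide (PySem.Int.mod (stripGoA (m + 1) i (m : Int)) i = 1)) := by
  have hndB : (D.map (fun d : Nat => (d : Int))).Nodup :=
    hnd.map (fun a b h => by exact_mod_cast h)
  have hndA := nodup_yakuA ((m : Int))
  rw [List.countP_eq_length_filter, List.countP_eq_length_filter,
    ← List.toFinset_card_of_nodup (hndB.filter _),
    ← List.toFinset_card_of_nodup (hndA.filter _)]
  congr 1
  ext x
  simp only [List.mem_toFinset, List.mem_filter, List.mem_map, mem_yakuA,
    decide_eq_true_eq]
  constructor
  · rintro ⟨⟨d, hdD, rfl⟩, hne, hstrip⟩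
    have hdvd := (hmem d).mp hdD
    have hd1 : 1 ≤ d := Nat.pos_of_dvd_of_pos hdvd (by omega)
    have hdm : d ≤ m := Nat.le_of_dvd (by omega) hdvd
    have h1 : d ≠ 1 := fun h => hne (Or.inl (by rw [h]; norm_num))
    have h2 : d ≠ m := fun h => hne (Or.inr (by rw [h]))
    refine ⟨⟨d, ⟨by omega, by omega, hdvd⟩, rfl⟩, ?_⟩
    rw [stripGo_eq]
    exact hstrip
  · rintro ⟨⟨d, ⟨h2d, hdm, hdvd⟩, rfl⟩, hstrip⟩
    refine ⟨⟨d, (hmem d).mpr hdvd, rfl⟩, ?_, ?_⟩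
    · rintro (h | h)
      · have : d = 1 := by exact_mod_cast h
        omega
      · have : d = m := by exact_mod_cast h
        omega
    · rw [← stripGo_eq]
      exact hstrip

lemma foldA_count (N : Int) (l : List Int) (a : Int) :
    l.foldl (fun ans i =>
      let n := stripGoA (N.toNat + 1) i N
      if PySem.Int.mod n i = 1 then ans + 1 else ans) a
    = a + ((l.countP (fun i => decide (PySem.Int.mod (stripGoA (N.toNat + 1) i N) i = 1)) : Nat) : Int) := by
  rw [← PySem.List.foldl_count_if]
  congr 1
  funext ans i
  by_cases h : PySem.Int.mod (stripGoA (N.toNat + 1) i N) i = 1 <;> simp [h]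

lemma foldB_count (N : Int) (l : List Int) (a : Int) :
    l.foldl (fun ans i =>
      if i = 1 ∨ i = N then ans
      else
        let m := stripGoB (N.toNat + 1) i N
        if PySem.Int.mod m i = 1 then ans + 1 else ans) a
    = a + ((l.countP (fun i => decide (¬(i = 1 ∨ i = N) ∧
        PySem.Int.mod (stripGoB (N.toNat + 1) i N) i = 1)) : Nat) : Int) := by
  rw [← PySem.List.foldl_count_if]
  congr 1
  funext ans i
  by_cases h1 : i = 1 ∨ i = N
  · simp [h1]
  · by_cases h : PySem.Int.mod (stripGoB (N.toNat + 1) i N) i = 1 <;> simp [h1, h]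

theorem main_eq (N : Int) (h : 1 ≤ N) : count_k_choices N = count_k_choices_alt N := by
  by_cases h2 : N = 2
  · subst h2; rfl
  · by_cases h1 : N = 1
    · subst h1; rfl
    · have hm3 : 3 ≤ N := by omega
      obtain ⟨m, rfl⟩ : ∃ m : Nat, N = (m : Int) := ⟨N.toNat, by omega⟩
      have hm : 3 ≤ m := by exact_mod_cast hm3
      simp only [count_k_choices, count_k_choices_alt, if_neg h2]
      have hsub : (m : Int) - 1 = ((m - 1 : Nat) : Int) := by omega
      obtain ⟨D1, hD1eq, hD1nd, hD1mem, hD1cnt⟩ := divisorsB_spec (m - 1) (by omega)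
      obtain ⟨D, hDeq, hDnd, hDmem, hDcnt⟩ := divisorsB_spec m (by omega)
      have hlen1 : D1.length = (m - 1).divisors.card :=
        length_eq_card_divisors _ (by omega) _ hD1nd hD1mem
      have hcard1 : (m - 1).divisors.card = (DF (m - 1)).card + 2 := card_DF _ (by omega)
      rw [hsub, len_yakuA (m - 1) (by omega), foldA_count, foldB_count, hD1cnt, hDeq]
      have hmax : max ((((D1.length : Nat) : Int)) - 2) 0 = (((DF (m - 1)).card : Nat) : Int) := by
        rw [max_eq_left (by omega)]
        omega
      rw [hmax]
      have hfuel : ((m : Int)).toNat + 1 = m + 1 := by simp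
      rw [hfuel]
      rw [countP_eq m hm D hDnd hDmem]

-- ===== VERDICT (by name: the statement is the Claim_ definition above) =====
theorem count_k_choices_spec : Claim_equal_count_k_choices := by
  intro N _ hpre
  unfold Spec_count_k_choices
  exact main_eq N hpre
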